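-- pv_equiv track=rewrite | github.com/Baalajisk/python | nptel assignment/onehop.py | onehop
-- ===== SOURCE A (Python) =====
-- def tolist(l):
--     li=[]
--     for i in range(0,len(l)):
--         li.append(list(l[i]))
--     return(li)
--
-- def totuple(li):
--     for i in range(0,len(li)):
--         li[i]=tuple(li[i])
--     return(li)
--
-- def onehop(l):
--     li=tolist(l)
--     one=[]
--     for i in range(0,len(li)):
--         for j in range(i,len(li)):
--             if li[i][1]==li[j][0] and li[i][0]!=li[j][1]:
--                 if li[i][0] not in one and li[j][1] not in one:
--                     one.append([li[i][0],li[j][1]])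
--
--             elif li[i][0]==li[j][1] and li[i][1]!=li[j][0]:
--                 if li[j][0] not in one and li[i][1] not in one:
--                     one.append([li[j][0],li[i][1]])
--
--     onehop=totuple(one)
--     onehop.sort()
--     for i in onehop:
--         while onehop.count(i)>1:
--
--             onehop.remove(i)
--     return(onehop)
-- ===== SOURCE B (Python) =====
-- def onehop(l):
--     adj = {}
--     for a, b in l:
--         adj.setdefault(a, []).append(b)
--     pairs = set()
--     for a, b in l:
--         for c in adj.get(b, ()):
--             if a != c:
--                 pairs.add((a, c))
--     return sorted(pairs)
-- ===== Notes on version B (the rewrite author's own statement) =====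
-- stated objective: faster
-- what changed: B indexes edges by source in a dict, joins each edge with its successors to get the two-hop pairs, dedups with a set and sorts once, replacing A's O(E^2) index double loop and its O(P^2) repeated count/remove dedup pass.
import Mathlib
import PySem

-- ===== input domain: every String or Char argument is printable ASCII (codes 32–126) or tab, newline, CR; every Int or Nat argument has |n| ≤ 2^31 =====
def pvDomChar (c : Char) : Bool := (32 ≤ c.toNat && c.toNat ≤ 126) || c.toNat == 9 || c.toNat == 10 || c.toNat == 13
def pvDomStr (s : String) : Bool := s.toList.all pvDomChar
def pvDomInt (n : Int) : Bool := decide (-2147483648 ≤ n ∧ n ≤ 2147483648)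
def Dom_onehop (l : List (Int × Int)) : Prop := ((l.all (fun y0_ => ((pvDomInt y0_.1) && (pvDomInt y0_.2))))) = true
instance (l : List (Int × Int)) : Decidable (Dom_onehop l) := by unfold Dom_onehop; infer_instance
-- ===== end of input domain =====

-- B replaces A's quadratic index double loop + repeated count/remove dedup with a
-- source-indexed dict join, a set for dedup and one sort (objective: faster).

-- ===== PORT A =====

-- helper tolist(l): li = []; for i in range(0, len(l)): li.append(list(l[i]))
-- (list(l[i]) turns the 2-tuple into a 2-element list; both are `Int × Int` here)
def onehopTolist (l : List (Int × Int)) : List (Int × Int) :=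
  (PySem.List.pyRange 0 (PySem.List.len l)).foldl
    (fun li i => li ++ [PySem.List.pyGetD l i (0, 0)]) []

-- helper totuple(li): rewrites each 2-element list back to a tuple in place; identity on `Int × Int`
def onehopTotuple (li : List (Int × Int)) : List (Int × Int) := li

-- inner `while onehop.count(i) > 1: onehop.remove(i)` (remove of a present value; count > 1
-- guarantees membership, so the `.getD xs` branch of remove? is never taken)
def onehopRmCnt (x : Int × Int) (xs : List (Int × Int)) : List (Int × Int) :=
  if h : xs.count x > 1 then onehopRmCnt x ((PySem.List.remove? xs x).getD xs) else xs
termination_by xs.count x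
decreasing_by
  have hx : x ∈ xs := List.count_pos_iff.mp (by omega)
  rw [PySem.List.remove?_eq_some_erase xs x hx, Option.getD_some]
  have h2 : List.count x (xs.erase x) = List.count x xs - 1 := List.count_erase_self
  omega

-- the loop never lengthens the list (cited by onehopDedupLoop's termination proof)
lemma onehopRmCnt_length_le (x : Int × Int) (xs : List (Int × Int)) :
    (onehopRmCnt x xs).length ≤ xs.length := by
  induction xs using onehopRmCnt.induct (x := x) with
  | case1 xs h ih =>
    rw [onehopRmCnt, dif_pos h]
    have hx : x ∈ xs := List.count_pos_iff.mp (by omega)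
    rw [PySem.List.remove?_eq_some_erase xs x hx, Option.getD_some] at ih ⊢
    have h2 : (xs.erase x).length ≤ xs.length := List.length_erase_le
    omega
  | case2 xs h =>
    rw [onehopRmCnt, dif_neg h]

-- outer `for i in onehop: while …` — CPython's list iterator keeps an index k into the
-- (shrinking) list and stops when k ≥ len
def onehopDedupLoop (xs : List (Int × Int)) (k : Nat) : List (Int × Int) :=
  if h : k < xs.length then onehopDedupLoop (onehopRmCnt xs[k] xs) (k + 1) else xs
termination_by xs.length - k
decreasing_by
  have := onehopRmCnt_length_le xs[k] xs
  omega

def onehop (l : List (Int × Int)) : List (Int × Int) :=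
  let li := onehopTolist l
  let one := (PySem.List.pyRange 0 (PySem.List.len li)).foldl (fun one i =>
    (PySem.List.pyRange i (PySem.List.len li)).foldl (fun one j =>
      let ri := PySem.List.pyGetD li i (0, 0)
      let rj := PySem.List.pyGetD li j (0, 0)
      -- `li[i][0] not in one and li[j][1] not in one`: `one` holds 2-element lists, and in
      -- Python `int == list` is always False, so both `not in` tests are constantly true
      if ri.2 = rj.1 ∧ ri.1 ≠ rj.2 then one ++ [(ri.1, rj.2)]
      else if ri.1 = rj.2 ∧ ri.2 ≠ rj.1 then one ++ [(rj.1, ri.2)]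
      else one) one) []
  let oneT := onehopTotuple one
  let s := PySem.List.sorted2 oneT Prod.fst Prod.snd   -- onehop.sort(): tuple-lexicographic
  onehopDedupLoop s 0

-- ===== PORT B =====
def onehop_alt (l : List (Int × Int)) : List (Int × Int) :=
  let adj := l.foldl (fun d p => d.modify p.1 [] (· ++ [p.2])) (PySem.Dict.empty)
  let pairs := l.foldl (fun s p =>
    (adj.getD p.2 []).foldl (fun s c =>
      if p.1 ≠ c then PySem.Set.add s (p.1, c) else s) s) PySem.Set.empty
  PySem.List.sorted2 pairs Prod.fst Prod.snd

-- ===== PRECONDITION & SPEC =====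
def Spec_onehop (l : List (Int × Int)) (out : List (Int × Int)) : Prop := out = onehop_alt l
instance (l : List (Int × Int)) (out : List (Int × Int)) : Decidable (Spec_onehop l out) := by unfold Spec_onehop; infer_instance

-- ===== CLAIM (what is proved, stated in full; the proofs are below) =====
def Claim_equal_onehop : Prop := ∀ (l : List (Int × Int)), Dom_onehop l → Spec_onehop l (onehop l)

-- ===== LEMMAS AND PROOFS =====

-- the two-hop predicate both programs compute the (sorted, deduplicated) pairs of
abbrev TwoHop (l : List (Int × Int)) (v : Int × Int) : Prop :=
  ∃ y, (v.1, y) ∈ l ∧ (y, v.2) ∈ l ∧ v.1 ≠ v.2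

-- sorted2 with fst/snd keys is sorting by the lexicographic linear order on pairs
lemma sorted2_eq_sorted_lex (xs : List (Int × Int)) :
    PySem.List.sorted2 xs Prod.fst Prod.snd = PySem.List.sorted xs (fun p => toLex p) := by
  have hfn : (fun (a b : Int × Int) => decide (a.1 < b.1) || (!decide (b.1 < a.1) && decide (a.2 < b.2)))
      = (fun a b => decide (toLex a < toLex b)) := by
    funext a b
    have h : (toLex a < toLex b) ↔ (a.1 < b.1 ∨ (a.1 = b.1 ∧ a.2 < b.2)) := Prod.Lex.toLex_lt_toLex
    by_cases h1 : a.1 < b.1 <;> by_cases h2 : b.1 < a.1 <;> by_cases h3 : a.2 < b.2 <;>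
      simp [h, h1, h2, h3] <;> omega
  rw [PySem.List.sorted_eq_foldl_insertBy]
  unfold PySem.List.sorted2
  simp only [Bool.false_eq_true, if_false, hfn]

-- tolist copies the list element by element
lemma onehopTolist_eq (l : List (Int × Int)) : onehopTolist l = l := by
  unfold onehopTolist
  rw [PySem.List.foldl_append_singleton_eq_map, PySem.List.map_pyGetD_pyRange_zero]
  simp

-- folding Set.add keeps the accumulator as a prefix and appends a sublist of the input
lemma foldl_add_sublist (xs : List (Int × Int)) : ∀ (s : List (Int × Int)),
    List.Sublist (xs.foldl PySem.Set.add s) (s ++ xs) := by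
  induction xs with
  | nil => intro s; simp
  | cons y ys ih =>
    intro s
    simp only [List.foldl_cons]
    by_cases hy : y ∈ s
    · rw [PySem.Set.add_of_mem hy]
      exact (ih s).trans (by simp)
    · rw [PySem.Set.add_of_not_mem hy]
      have := ih (s ++ [y])
      simpa using this

lemma ofList_sublist (xs : List (Int × Int)) : List.Sublist (PySem.Set.ofList xs) xs := by
  have := foldl_add_sublist xs []
  simpa [PySem.Set.ofList] using this

-- folding Set.add from two accumulators agreeing on membership of the input appends the same tail
lemma foldl_add_congr (xs : List (Int × Int)) : ∀ (s t : List (Int × Int)),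
    (∀ y ∈ xs, y ∈ s ↔ y ∈ t) →
    ∃ D, xs.foldl PySem.Set.add s = s ++ D ∧ xs.foldl PySem.Set.add t = t ++ D := by
  induction xs with
  | nil => intro s t _; exact ⟨[], by simp, by simp⟩
  | cons y ys ih =>
    intro s t hmem
    simp only [List.foldl_cons]
    by_cases hy : y ∈ s
    · have hyt : y ∈ t := (hmem y (by simp)).mp hy
      rw [PySem.Set.add_of_mem hy, PySem.Set.add_of_mem hyt]
      exact ih s t (fun z hz => hmem z (by simp [hz]))
    · have hyt : y ∉ t := fun h => hy ((hmem y (by simp)).mpr h)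
      rw [PySem.Set.add_of_not_mem hy, PySem.Set.add_of_not_mem hyt]
      obtain ⟨D, h1, h2⟩ := ih (s ++ [y]) (t ++ [y])
        (fun z hz => by simp [hmem z (by simp [hz])])
      exact ⟨y :: D, by simpa using h1, by simpa using h2⟩

-- dedup of a replicate-headed list whose head is absent from the tail
lemma dedup_replicate_append (m : Nat) (x : Int × Int) (rest : List (Int × Int))
    (hx : x ∉ rest) :
    PySem.List.dedup (List.replicate (m + 1) x ++ rest) = x :: PySem.List.dedup rest := by
  have hrep : ∀ n : Nat, (List.replicate n x).foldl PySem.Set.add [x] = [x] := by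
    intro n; induction n with
    | zero => rfl
    | succ n ihn =>
      rw [List.replicate_succ, List.foldl_cons, PySem.Set.add_of_mem (by simp : x ∈ [x])]
      exact ihn
  have h0 : PySem.List.dedup (List.replicate (m + 1) x ++ rest)
      = rest.foldl PySem.Set.add [x] := by
    simp only [PySem.List.dedup, PySem.Set.ofList, List.foldl_append]
    congr 1
    have : (List.replicate (m + 1) x).foldl PySem.Set.add PySem.Set.empty
        = (List.replicate m x).foldl PySem.Set.add [x] := by
      simp [List.replicate_succ, PySem.Set.empty]
    rw [this, hrep]
  obtain ⟨D, h1, h2⟩ := foldl_add_congr rest [x] []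
    (fun z hz => by
      have : z ≠ x := fun h => hx (h ▸ hz)
      simp [this])
  rw [h0, h1]
  simp only [PySem.List.dedup, PySem.Set.ofList, PySem.Set.empty]
  rw [h2]
  simp

-- a sorted (lex-≤) nonempty list starts with a contiguous block of copies of its head
lemma sorted_head_block (x : Int × Int) (t : List (Int × Int))
    (h : (x :: t).Pairwise (fun a b => toLex a ≤ toLex b)) :
    ∃ m rest, x :: t = List.replicate (m + 1) x ++ rest ∧ x ∉ rest := by
  induction t generalizing x with
  | nil => exact ⟨0, [], by simp⟩
  | cons y t' ih =>
    by_cases hxy : y = x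
    · subst hxy
      obtain ⟨m, rest, heq, hrest⟩ := ih y (List.pairwise_cons.mp h).2
      exact ⟨m + 1, rest, by rw [List.replicate_succ, List.cons_append, ← heq], hrest⟩
    · refine ⟨0, y :: t', by simp, ?_⟩
      intro hmem
      rcases List.mem_cons.mp hmem with h1 | h1
      · exact hxy h1.symm
      · have hp := List.pairwise_cons.mp h
        have hxley : toLex x ≤ toLex y := hp.1 y (by simp)
        have hylex : toLex y ≤ toLex x := (List.pairwise_cons.mp hp.2).1 x h1
        exact hxy ((toLex.injective (le_antisymm hylex hxley)).symm).symm

-- the while-loop removes all but one copy of x from a contiguous block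
lemma onehopRmCnt_eq (m : Nat) : ∀ (x : Int × Int) (P rest : List (Int × Int)),
    x ∉ P → x ∉ rest →
    onehopRmCnt x (P ++ List.replicate (m + 1) x ++ rest) = P ++ [x] ++ rest := by
  induction m with
  | zero =>
    intro x P rest hP hrest
    have c1 : (P ++ List.replicate (0 + 1) x ++ rest).count x = 1 := by
      rw [List.count_append, List.count_append, List.count_eq_zero_of_not_mem hP,
        List.count_eq_zero_of_not_mem hrest, List.count_replicate_self]
    rw [onehopRmCnt, dif_neg (by omega)]
    simp
  | succ m ih =>
    intro x P rest hP hrest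
    have hcnt : (P ++ List.replicate (m + 1 + 1) x ++ rest).count x = m + 2 := by
      rw [List.count_append, List.count_append, List.count_eq_zero_of_not_mem hP,
        List.count_eq_zero_of_not_mem hrest, List.count_replicate_self]
      omega
    have hmem : x ∈ P ++ List.replicate (m + 1 + 1) x ++ rest := by simp
    rw [onehopRmCnt, dif_pos (by omega), PySem.List.remove?_eq_some_erase _ x hmem, Option.getD_some]
    have herase : (P ++ List.replicate (m + 1 + 1) x ++ rest).erase x
        = P ++ List.replicate (m + 1) x ++ rest := by
      rw [List.append_assoc, List.erase_append_right _ hP, List.replicate_succ,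
        List.cons_append, List.erase_cons_head, List.append_assoc]
    rw [herase]
    exact ih x P rest hP hrest

-- the dedup loop on a sorted list is first-occurrence dedup
lemma onehopDedupLoop_eq (xs : List (Int × Int)) (k : Nat)
    (hs : xs.Pairwise (fun a b => toLex a ≤ toLex b))
    (hnd : (xs.take k).Nodup)
    (hdisj : ∀ v ∈ xs.take k, v ∉ xs.drop k) :
    onehopDedupLoop xs k = xs.take k ++ PySem.List.dedup (xs.drop k) := by
  induction xs, k using onehopDedupLoop.induct with
  | case1 xs k hk ih =>
    set x := xs[k] with hxdef
    have hdropk : xs.drop k = x :: xs.drop (k + 1) := List.drop_eq_getElem_cons hk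
    have hxid : x ∈ xs.drop k := by rw [hdropk]; simp
    have hxnt : x ∉ xs.take k := fun hmem => hdisj x hmem hxid
    have hsd : (x :: xs.drop (k + 1)).Pairwise (fun a b => toLex a ≤ toLex b) := by
      rw [← hdropk]; exact hs.sublist (List.drop_sublist k xs)
    obtain ⟨m, rest, hblock, hrest⟩ := sorted_head_block x (xs.drop (k + 1)) hsd
    have hxs : xs = xs.take k ++ List.replicate (m + 1) x ++ rest := by
      conv_lhs => rw [← List.take_append_drop k xs]
      rw [hdropk, hblock, List.append_assoc]
    have hrm : onehopRmCnt x xs = (xs.take k ++ [x]) ++ rest := by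
      conv_lhs => rw [hxs]
      exact onehopRmCnt_eq m x _ rest hxnt hrest
    have hlen1 : (xs.take k ++ [x]).length = k + 1 := by
      simp [List.length_take_of_le (le_of_lt hk)]
    have htake1 : (onehopRmCnt x xs).take (k + 1) = xs.take k ++ [x] := by
      rw [hrm, List.take_left' hlen1]
    have hdrop1 : (onehopRmCnt x xs).drop (k + 1) = rest := by
      rw [hrm, List.drop_left' hlen1]
    have hsub : List.Sublist (onehopRmCnt x xs) xs := by
      rw [hrm]
      conv_rhs => rw [hxs]
      rw [List.append_assoc, List.append_assoc]
      refine List.Sublist.append_left ?_ _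
      rw [List.replicate_succ, List.singleton_append, List.cons_append]
      exact (List.sublist_append_right _ _).cons₂ x
    have ih' := ih
      (hs.sublist hsub)
      (by rw [htake1]; exact List.Nodup.append hnd (by simp) (by
        simp only [List.disjoint_singleton]
        exact hxnt))
      (by
        intro v hv
        rw [htake1] at hv
        rw [hdrop1]
        rcases List.mem_append.mp hv with h1 | h1
        · intro hvr
          exact hdisj v h1 (by
            rw [hdropk, hblock]
            exact List.mem_cons_of_mem _ (List.mem_append_right _ hvr))
        · intro hvr
          have hvx : v = x := List.mem_singleton.mp h1
          exact hrest (hvx ▸ hvr))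
    rw [onehopDedupLoop, dif_pos hk, ← hxdef, ih', htake1, hdrop1]
    rw [hdropk, hblock, dedup_replicate_append m x rest hrest]
    simp
  | case2 xs k hk =>
    rw [onehopDedupLoop, dif_neg hk]
    rw [List.take_of_length_le (by omega), List.drop_of_length_le (by omega)]
    simp [PySem.List.dedup, PySem.Set.ofList]

-- the pair A's double loop appends for indices (i, j)
def oneBody (l : List (Int × Int)) (i j : Int) : List (Int × Int) :=
  let ri := PySem.List.pyGetD l i (0, 0)
  let rj := PySem.List.pyGetD l j (0, 0)
  if ri.2 = rj.1 ∧ ri.1 ≠ rj.2 then [(ri.1, rj.2)]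
  else if ri.1 = rj.2 ∧ ri.2 ≠ rj.1 then [(rj.1, ri.2)]
  else []

lemma one_eq_flatMap (l : List (Int × Int)) :
    (PySem.List.pyRange 0 (PySem.List.len l)).foldl (fun one i =>
      (PySem.List.pyRange i (PySem.List.len l)).foldl (fun one j =>
        let ri := PySem.List.pyGetD l i (0, 0)
        let rj := PySem.List.pyGetD l j (0, 0)
        if ri.2 = rj.1 ∧ ri.1 ≠ rj.2 then one ++ [(ri.1, rj.2)]
        else if ri.1 = rj.2 ∧ ri.2 ≠ rj.1 then one ++ [(rj.1, ri.2)]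
        else one) one) []
    = (PySem.List.pyRange 0 (PySem.List.len l)).flatMap (fun i =>
        (PySem.List.pyRange i (PySem.List.len l)).flatMap (fun j => oneBody l i j)) := by
  have hinner : ∀ (i : Int) (acc : List (Int × Int)),
      (PySem.List.pyRange i (PySem.List.len l)).foldl (fun one j =>
        let ri := PySem.List.pyGetD l i (0, 0)
        let rj := PySem.List.pyGetD l j (0, 0)
        if ri.2 = rj.1 ∧ ri.1 ≠ rj.2 then one ++ [(ri.1, rj.2)]
        else if ri.1 = rj.2 ∧ ri.2 ≠ rj.1 then one ++ [(rj.1, ri.2)]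
        else one) acc
      = acc ++ (PySem.List.pyRange i (PySem.List.len l)).flatMap (fun j => oneBody l i j) := by
    intro i acc
    have hfn : (fun (one : List (Int × Int)) (j : Int) =>
        let ri := PySem.List.pyGetD l i (0, 0)
        let rj := PySem.List.pyGetD l j (0, 0)
        if ri.2 = rj.1 ∧ ri.1 ≠ rj.2 then one ++ [(ri.1, rj.2)]
        else if ri.1 = rj.2 ∧ ri.2 ≠ rj.1 then one ++ [(rj.1, ri.2)]
        else one)
        = (fun one j => one ++ oneBody l i j) := by
      funext one j
      simp only [oneBody]
      split_ifs <;> simp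
    rw [hfn, PySem.List.foldl_append_eq_flatMap]
  have hfn2 : (fun (one : List (Int × Int)) (i : Int) =>
      (PySem.List.pyRange i (PySem.List.len l)).foldl (fun one j =>
        let ri := PySem.List.pyGetD l i (0, 0)
        let rj := PySem.List.pyGetD l j (0, 0)
        if ri.2 = rj.1 ∧ ri.1 ≠ rj.2 then one ++ [(ri.1, rj.2)]
        else if ri.1 = rj.2 ∧ ri.2 ≠ rj.1 then one ++ [(rj.1, ri.2)]
        else one) one)
      = (fun one i => one ++ (PySem.List.pyRange i (PySem.List.len l)).flatMap (fun j => oneBody l i j)) := by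
    funext one i; exact hinner i one
  rw [hfn2, PySem.List.foldl_append_eq_flatMap]
  simp

-- membership in A's `one` list is the two-hop predicate
lemma mem_one_iff (l : List (Int × Int)) (v : Int × Int) :
    v ∈ (PySem.List.pyRange 0 (PySem.List.len l)).flatMap (fun i =>
        (PySem.List.pyRange i (PySem.List.len l)).flatMap (fun j => oneBody l i j))
    ↔ TwoHop l v := by
  simp only [List.mem_flatMap, PySem.List.mem_pyRange_one]
  constructor
  · rintro ⟨i, ⟨hi0, hin⟩, j, ⟨hij, hjn⟩, hv⟩
    have hlen : PySem.List.len l = (l.length : Int) := by simp [PySem.List.len]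
    rw [hlen] at hin hjn
    have hj0 : 0 ≤ j := le_trans hi0 hij
    rw [oneBody, PySem.List.pyGetD_eq_getElem l (0,0) hi0 hin,
      PySem.List.pyGetD_eq_getElem l (0,0) hj0 hjn] at hv
    set ri := l[i.toNat]
    set rj := l[j.toNat]
    have hri : ri ∈ l := List.getElem_mem _
    have hrj : rj ∈ l := List.getElem_mem _
    by_cases h1 : ri.2 = rj.1 ∧ ri.1 ≠ rj.2
    · rw [if_pos h1] at hv
      have hv' : v = (ri.1, rj.2) := by simpa using hv
      subst hv'
      exact ⟨ri.2, by simpa using hri, by rw [h1.1]; simpa using hrj, h1.2⟩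
    · rw [if_neg h1] at hv
      by_cases h2 : ri.1 = rj.2 ∧ ri.2 ≠ rj.1
      · rw [if_pos h2] at hv
        have hv' : v = (rj.1, ri.2) := by simpa using hv
        subst hv'
        refine ⟨rj.2, by simpa using hrj, ?_, fun h => h2.2 h.symm⟩
        have : (rj.2, ri.2) = ri := by rw [← h2.1]
        simpa [this] using hri
      · rw [if_neg h2] at hv; simp at hv
  · rintro ⟨y, hy1, hy2, hne⟩
    obtain ⟨i', hi'len, hi'⟩ := List.mem_iff_getElem.mp hy1
    obtain ⟨j', hj'len, hj'⟩ := List.mem_iff_getElem.mp hy2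
    have hlen : PySem.List.len l = (l.length : Int) := by simp [PySem.List.len]
    rcases le_or_gt i' j' with hle | hgt
    · refine ⟨(i' : Int), ⟨by positivity, by rw [hlen]; exact_mod_cast hi'len⟩,
        (j' : Int), ⟨by exact_mod_cast hle, by rw [hlen]; exact_mod_cast hj'len⟩, ?_⟩
      rw [oneBody, PySem.List.pyGetD_eq_getElem l (0,0) (by positivity) (by exact_mod_cast hi'len),
        PySem.List.pyGetD_eq_getElem l (0,0) (by positivity) (by exact_mod_cast hj'len)]
      simp only [Int.toNat_natCast, hi', hj']
      rw [if_pos (by simp [hne])]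
      simp
    · refine ⟨(j' : Int), ⟨by positivity, by rw [hlen]; exact_mod_cast hj'len⟩,
        (i' : Int), ⟨by exact_mod_cast (le_of_lt hgt), by rw [hlen]; exact_mod_cast hi'len⟩, ?_⟩
      rw [oneBody, PySem.List.pyGetD_eq_getElem l (0,0) (by positivity) (by exact_mod_cast hj'len),
        PySem.List.pyGetD_eq_getElem l (0,0) (by positivity) (by exact_mod_cast hi'len)]
      simp only [Int.toNat_natCast, hi', hj']
      rw [if_neg (by
          simp only [not_and, ne_eq, not_not]
          intro h
          exact absurd h.symm hne), if_pos (by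
          constructor
          · simp
          · simp only [ne_eq]
            intro h
            exact hne h.symm)]
      simp

-- the list of pairs B's inner loop adds for edge p
def bGen (l : List (Int × Int)) (p : Int × Int) : List (Int × Int) :=
  ((((l.foldl (fun d p => d.modify p.1 [] (· ++ [p.2])) (PySem.Dict.empty)).getD p.2 []).filter
    (fun c => decide (p.1 ≠ c))).map (fun c => (p.1, c)))

-- B's set of pairs is set(all generated pairs)
lemma pairs_eq_ofList (l : List (Int × Int)) :
    l.foldl (fun s p =>
      ((l.foldl (fun d p => d.modify p.1 [] (· ++ [p.2])) (PySem.Dict.empty)).getD p.2 []).foldl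
        (fun s c => if p.1 ≠ c then PySem.Set.add s (p.1, c) else s) s) PySem.Set.empty
    = PySem.Set.ofList (l.flatMap (bGen l)) := by
  set adj := l.foldl (fun d p => d.modify p.1 [] (· ++ [p.2])) (PySem.Dict.empty) with hadj
  have hinner : ∀ (p : Int × Int) (s : PySem.Set (Int × Int)),
      (adj.getD p.2 []).foldl (fun s c => if p.1 ≠ c then PySem.Set.add s (p.1, c) else s) s
      = (bGen l p).foldl PySem.Set.add s := by
    intro p s
    rw [PySem.List.foldl_ite_eq_foldl_filter]
    rw [bGen, ← hadj, List.foldl_map]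
  have houter : ∀ (ps : List (Int × Int)) (s : PySem.Set (Int × Int)),
      ps.foldl (fun s p =>
        (adj.getD p.2 []).foldl (fun s c => if p.1 ≠ c then PySem.Set.add s (p.1, c) else s) s) s
      = (ps.flatMap (bGen l)).foldl PySem.Set.add s := by
    intro ps
    induction ps with
    | nil => intro s; simp
    | cons q qs ih =>
      intro s
      simp only [List.foldl_cons, List.flatMap_cons, List.foldl_append]
      rw [hinner, ih]
  rw [houter]
  rfl

-- B's adjacency dict lists exactly the successors
lemma adj_getD (l : List (Int × Int)) (b c : Int) :
    c ∈ (l.foldl (fun d p => d.modify p.1 [] (· ++ [p.2])) (PySem.Dict.empty)).getD b []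
    ↔ (b, c) ∈ l := by
  rw [PySem.Dict.getD_foldl_modify_append]
  have h0 : (PySem.Dict.empty : PySem.Dict Int (List Int)).getD b [] = [] := rfl
  rw [h0, List.nil_append]
  constructor
  · intro h
    simp only [List.mem_map, List.mem_filter] at h
    obtain ⟨q, ⟨hq, hqb⟩, hqc⟩ := h
    have : q = (b, c) := by
      have h1 : q.1 = b := by simpa using hqb
      have h2 : q.2 = c := hqc
      exact Prod.ext h1 h2
    exact this ▸ hq
  · intro h
    simp only [List.mem_map, List.mem_filter]
    exact ⟨(b, c), ⟨h, by simp⟩, rfl⟩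

-- membership in B's generated pairs is the two-hop predicate
lemma mem_flatMap_bGen_iff (l : List (Int × Int)) (v : Int × Int) :
    v ∈ l.flatMap (bGen l) ↔ TwoHop l v := by
  simp only [List.mem_flatMap, bGen, List.mem_map, List.mem_filter]
  constructor
  · rintro ⟨p, hp, c, ⟨hc, hne⟩, hv⟩
    refine ⟨p.2, ?_, ?_, ?_⟩
    · rw [← hv]; simpa using hp
    · rw [← hv]; simpa using (adj_getD l p.2 c).mp hc
    · rw [← hv]; simpa using hne
  · rintro ⟨y, h1, h2, hne⟩
    exact ⟨(v.1, y), h1, v.2, ⟨(adj_getD l y v.2).mpr h2, by simpa using hne⟩, rfl⟩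

-- ===== VERDICT (by name: the statement is the Claim_ definition above) =====
theorem onehop_spec : Claim_equal_onehop := by
  intro l _dom
  show onehop l = onehop_alt l
  -- name A's deduplicated-pair list and B's generated-pair list
  simp only [onehop, onehopTotuple, onehopTolist_eq, one_eq_flatMap]
  simp only [onehop_alt, pairs_eq_ofList]
  set one := (PySem.List.pyRange 0 (PySem.List.len l)).flatMap (fun i =>
    (PySem.List.pyRange i (PySem.List.len l)).flatMap (fun j => oneBody l i j)) with hone
  set genB := l.flatMap (bGen l) with hgen
  rw [sorted2_eq_sorted_lex one, sorted2_eq_sorted_lex (PySem.Set.ofList genB)]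
  set SA := PySem.List.sorted one (fun p => toLex p) with hSA
  -- A's dedup loop on the sorted list is first-occurrence dedup
  have hsorted : SA.Pairwise (fun a b => toLex a ≤ toLex b) :=
    PySem.List.sorted_pairwise one (fun p => toLex p)
  have hA : onehopDedupLoop SA 0 = PySem.Set.ofList SA := by
    rw [onehopDedupLoop_eq SA 0 hsorted (by simp) (by simp)]
    simp [PySem.List.dedup]
  rw [hA]
  -- both sides are the Nodup lex-sorted list of the two-hop pairs
  have hndA : (PySem.Set.ofList SA).Nodup := PySem.Set.nodup_ofList _
  have hpwA : (PySem.Set.ofList SA).Pairwise (fun a b => toLex a < toLex b) := by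
    have hle : (PySem.Set.ofList SA).Pairwise (fun a b => toLex a ≤ toLex b) :=
      hsorted.sublist (ofList_sublist SA)
    exact (hle.and hndA).imp (fun h =>
      lt_of_le_of_ne h.1 (fun heq => h.2 (toLex.injective heq)))
  have hperm : (PySem.Set.ofList SA).Perm (PySem.Set.ofList genB) := by
    refine (List.perm_ext_iff_of_nodup hndA (PySem.Set.nodup_ofList _)).mpr ?_
    intro v
    rw [PySem.Set.mem_ofList, PySem.Set.mem_ofList, PySem.List.mem_sorted, mem_one_iff,
      mem_flatMap_bGen_iff]
  exact (PySem.List.sorted_eq_of_perm_of_pairwise_lt _ _ _ hperm hpwA).symm
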